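-- pv_equiv track=rewrite | github.com/MikhailBekhovskiy/AVM | parse.py | parse_name
-- ===== SOURCE A (Python) =====
-- def parse_name(st: str, start: int, stop_symbols={'^', '[', ']', ' ', '*'},
--                backwards=False) -> tuple[str, int]:
--     res = ''
--     i = start
--     while i < len(st) and st[i] not in stop_symbols:
--         if backwards:
--             res = st[i] + res
--             if i > 0:
--                 i -= 1
--             else:
--                 break
--         else:
--             res += st[i]
--             i += 1
--     return res, i
-- ===== SOURCE B (Python) =====
-- def parse_name(st: str, start: int, stop_symbols={'^', '[', ']', ' ', '*'},
--                backwards=False) -> tuple[str, int]: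
--     n = len(st)
--     if backwards:
--         if start >= n:
--             return '', start
--         j = start
--         while j >= 0 and st[j] not in stop_symbols:
--             j -= 1
--         return st[j + 1:start + 1], max(j, 0)
--     j = start
--     while j < n and st[j] not in stop_symbols:
--         j += 1
--     return st[start:j], j
-- ===== Notes on version B (the rewrite author's own statement) =====
-- stated objective: simpler
-- what changed: B first locates the boundary index with a bare index scan and then extracts the token with one slice, instead of A's loop that concatenates one character per iteration into an accumulator string.
-- outside the precondition, e.g. on parse_name('abc', -2, {' '}, False): A returns ('bcabc', 3), B returns ('bc', 3)
import Mathlib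
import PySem

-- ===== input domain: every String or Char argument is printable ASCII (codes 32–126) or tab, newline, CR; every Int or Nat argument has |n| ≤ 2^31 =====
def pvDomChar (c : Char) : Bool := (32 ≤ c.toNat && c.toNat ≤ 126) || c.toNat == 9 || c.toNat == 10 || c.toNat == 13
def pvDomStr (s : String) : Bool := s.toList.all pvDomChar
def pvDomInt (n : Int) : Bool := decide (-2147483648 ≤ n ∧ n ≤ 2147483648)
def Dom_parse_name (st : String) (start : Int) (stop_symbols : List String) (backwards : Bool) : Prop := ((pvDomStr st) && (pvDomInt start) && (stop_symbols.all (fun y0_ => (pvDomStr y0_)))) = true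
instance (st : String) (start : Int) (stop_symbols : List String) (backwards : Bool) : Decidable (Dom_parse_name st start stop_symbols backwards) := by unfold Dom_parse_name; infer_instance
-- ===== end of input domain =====

-- B locates the boundary index with a bare scan and extracts the token with one slice,
-- instead of A's loop that concatenates one character per iteration: simpler extraction.


-- ===== PORT A =====
-- st[i] in stop_symbols : the one-character string made of st[i] is a member of the set
def pvIsStop (stops : List String) (c : Char) : Bool := stops.contains (String.mk [c])

-- A's while loop, state (res, i); pyGet? none = Python IndexError (unreachable under Pre_)
def pvLoopA (chars : List Char) (stops : List String) (backwards : Bool) (res : List Char) (i : Int) : List Char × Int :=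
  if _h : i < (chars.length : Int) then
    match PySem.List.pyGet? chars i with
    | none => (res, i)
    | some c =>
      if pvIsStop stops c then (res, i)
      else if hb : backwards = true then
        if hi : 0 < i then pvLoopA chars stops backwards (c :: res) (i - 1)
        else (c :: res, i)
      else pvLoopA chars stops backwards (res ++ [c]) (i + 1)
  else (res, i)
termination_by (if backwards then (i + 1).toNat else ((chars.length : Int) - i).toNat)
decreasing_by
  all_goals simp [hb]; omega

def parse_name (st : String) (start : Int) (stop_symbols : List String) (backwards : Bool) : String × Int :=
  let r := pvLoopA st.toList stop_symbols backwards [] start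
  (String.mk r.1, r.2)

-- ===== PORT B =====
-- forward boundary: advance j while in range and st[j] is not a stop symbol
def pvFwd (chars : List Char) (stops : List String) (j : Int) : Int :=
  if _h : j < (chars.length : Int) then
    match PySem.List.pyGet? chars j with
    | none => j
    | some c => if pvIsStop stops c then j else pvFwd chars stops (j + 1)
  else j
termination_by ((chars.length : Int) - j).toNat

-- backward boundary: decrement j while j ≥ 0 and st[j] is not a stop symbol
def pvBwd (chars : List Char) (stops : List String) (j : Int) : Int :=
  if _h : 0 ≤ j then
    match PySem.List.pyGet? chars j with
    | none => j
    | some c => if pvIsStop stops c then j else pvBwd chars stops (j - 1)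
  else j
termination_by (j + 1).toNat

def parse_name_alt (st : String) (start : Int) (stop_symbols : List String) (backwards : Bool) : String × Int :=
  if backwards then
    if (st.toList.length : Int) ≤ start then ("", start)
    else
      let j := pvBwd st.toList stop_symbols start
      (String.mk (PySem.List.slice st.toList (some (j + 1)) (some (start + 1))), max j 0)
  else
    let j := pvFwd st.toList stop_symbols start
    (String.mk (PySem.List.slice st.toList (some start) (some j)), j)

-- ===== PRECONDITION & SPEC =====
-- Pre_ excludes negative start: there A either raises IndexError (start < -len) or assembles
-- its token through Python's accidental negative-index wraparound, a corner no caller of this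
-- parser relies on; B slices there and returns a different value.
def Pre_parse_name (st : String) (start : Int) (stop_symbols : List String) (backwards : Bool) : Prop := 0 ≤ start
instance (st : String) (start : Int) (stop_symbols : List String) (backwards : Bool) : Decidable (Pre_parse_name st start stop_symbols backwards) := by unfold Pre_parse_name; infer_instance

def pvWitness_parse_name : String × Int × List String × Bool := ("ab cd", 0, ["^", "[", "]", " ", "*"], false)

def Spec_parse_name (st : String) (start : Int) (stop_symbols : List String) (backwards : Bool) (out : String × Int) : Prop := out = parse_name_alt st start stop_symbols backwards
instance (st : String) (start : Int) (stop_symbols : List String) (backwards : Bool) (out : String × Int) : Decidable (Spec_parse_name st start stop_symbols backwards out) := by unfold Spec_parse_name; infer_instance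

-- ===== CLAIM (what is proved, stated in full; the proofs are below) =====
def Claim_equal_parse_name : Prop := ∀ (st : String) (start : Int) (stop_symbols : List String) (backwards : Bool), Dom_parse_name st start stop_symbols backwards → Pre_parse_name st start stop_symbols backwards → Spec_parse_name st start stop_symbols backwards (parse_name st start stop_symbols backwards)

-- ===== LEMMAS AND PROOFS =====

theorem le_pvFwd (chars : List Char) (stops : List String) (j : Int) :
    j ≤ pvFwd chars stops j := by
  unfold pvFwd
  split
  · split
    · exact le_refl j
    · split
      · exact le_refl j
      · have := le_pvFwd chars stops (j + 1)
        omega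
  · exact le_refl j
termination_by ((chars.length : Int) - j).toNat

theorem pvBwd_le (chars : List Char) (stops : List String) (j : Int) :
    pvBwd chars stops j ≤ j := by
  unfold pvBwd
  split
  · split
    · exact le_refl j
    · split
      · exact le_refl j
      · have := pvBwd_le chars stops (j - 1)
        omega
  · exact le_refl j
termination_by (j + 1).toNat

theorem neg_one_le_pvBwd (chars : List Char) (stops : List String) (j : Int) (h : -1 ≤ j) :
    -1 ≤ pvBwd chars stops j := by
  unfold pvBwd
  split
  · split
    · exact h
    · split
      · exact h
      · exact neg_one_le_pvBwd chars stops (j - 1) (by omega)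
  · exact h
termination_by (j + 1).toNat

-- slice xs[i:i] = [] for 0 ≤ i
theorem slice_self (xs : List Char) (i : Int) (h : 0 ≤ i) :
    PySem.List.slice xs (some i) (some i) = [] := by
  rw [PySem.List.slice_toNat xs h h]
  simp

-- forward invariant: A's loop = accumulator ++ slice up to the boundary
theorem fwd_inv (chars : List Char) (stops : List String) :
    ∀ (k : Nat) (i : Int) (acc : List Char), 0 ≤ i → (chars.length : Int) ≤ i + k →
      pvLoopA chars stops false acc i =
        (acc ++ PySem.List.slice chars (some i) (some (pvFwd chars stops i)), pvFwd chars stops i) := by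
  intro k
  induction k with
  | zero =>
    intro i acc h0 hk
    rw [pvLoopA, pvFwd]
    rw [dif_neg (by omega), dif_neg (by omega)]
    rw [slice_self chars i h0]
    simp
  | succ k ih =>
    intro i acc h0 hk
    by_cases hlt : i < (chars.length : Int)
    · have hget : PySem.List.pyGet? chars i = some chars[i.toNat] :=
        PySem.List.pyGet?_eq_some_getElem chars h0 (by omega)
      by_cases hstop : pvIsStop stops chars[i.toNat] = true
      · rw [pvLoopA, pvFwd, dif_pos hlt, dif_pos hlt, hget]
        simp only [hstop, if_true]
        rw [slice_self chars i h0]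
        simp
      · rw [pvLoopA, pvFwd, dif_pos hlt, dif_pos hlt, hget]
        simp only [hstop, if_false, Bool.false_eq_true]
        rw [dif_neg not_false]
        rw [ih (i + 1) (acc ++ [chars[i.toNat]]) (by omega) (by omega)]
        have hj := le_pvFwd chars stops (i + 1)
        set j := pvFwd chars stops (i + 1) with hjdef
        rw [PySem.List.slice_toNat chars h0 (by omega : (0:Int) ≤ j),
            PySem.List.slice_toNat chars (by omega : (0:Int) ≤ i + 1) (by omega : (0:Int) ≤ j)]
        have hi1 : (i + 1).toNat = i.toNat + 1 := by omega
        rw [hi1]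
        rw [List.drop_eq_getElem_cons (show i.toNat < chars.length by omega)]
        have htn : j.toNat - i.toNat = (j.toNat - (i.toNat + 1)) + 1 := by omega
        rw [htn, List.take_succ_cons]
        simp
    · rw [pvLoopA, pvFwd, dif_neg hlt, dif_neg hlt]
      rw [slice_self chars i h0]
      simp

-- slice xs[a:i+1] = slice xs[a:i] ++ [xs[i]]
theorem slice_snoc (xs : List Char) (a i : Int) (h0 : 0 ≤ a) (hai : a ≤ i)
    (hil : i < (xs.length : Int)) :
    PySem.List.slice xs (some a) (some (i + 1)) =
      PySem.List.slice xs (some a) (some i) ++ [xs[i.toNat]] := by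
  rw [PySem.List.slice_toNat xs h0 (by omega : (0:Int) ≤ i + 1),
      PySem.List.slice_toNat xs h0 (by omega : (0:Int) ≤ i)]
  have h1 : (i + 1).toNat - a.toNat = (i.toNat - a.toNat) + 1 := by omega
  rw [h1, List.take_succ]
  congr 1
  rw [List.getElem?_drop]
  have h2 : a.toNat + (i.toNat - a.toNat) = i.toNat := by omega
  rw [h2, List.getElem?_eq_getElem (by omega)]
  rfl

-- backward invariant: A's loop = slice from past the boundary, index clamped at 0
theorem bwd_inv (chars : List Char) (stops : List String) :
    ∀ (n : Nat) (acc : List Char), n < chars.length →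
      pvLoopA chars stops true acc (n : Int) =
        (PySem.List.slice chars (some (pvBwd chars stops (n : Int) + 1)) (some ((n : Int) + 1)) ++ acc,
          max (pvBwd chars stops (n : Int)) 0) := by
  intro n
  induction n with
  | zero =>
    intro acc hn
    simp only [Nat.cast_zero]
    have hget : PySem.List.pyGet? chars (0 : Int) = some chars[0] :=
      PySem.List.pyGet?_eq_some_getElem chars (by omega) (by exact_mod_cast hn)
    by_cases hstop : pvIsStop stops chars[0] = true
    · rw [pvLoopA, pvBwd, dif_pos (by push_cast; omega), dif_pos (by omega), hget]
      simp only [hstop, if_true]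
      rw [slice_self chars _ (by omega)]
      simp
    · rw [pvLoopA, pvBwd, dif_pos (by push_cast; omega), dif_pos (by omega), hget]
      simp only [hstop, if_false, Bool.false_eq_true]
      rw [dif_pos trivial, dif_neg (by omega : ¬ (0:Int) < 0)]
      have hb1 : pvBwd chars stops ((0 : Int) - 1) = -1 := by
        rw [pvBwd, dif_neg (by omega)]
        norm_num
      rw [hb1]
      have hsl : PySem.List.slice chars (some (-1 + 1)) (some ((0 : Int) + 1)) = [chars[0]] := by
        norm_num
        rw [PySem.List.slice_to chars (by omega : (0:Int) ≤ 1)]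
        norm_num
        rw [List.take_one, List.head?_eq_getElem?, List.getElem?_eq_getElem hn]
        rfl
      rw [hsl]
      simp
  | succ m ih =>
    intro acc hn
    have h0 : (0 : Int) ≤ ((m + 1 : Nat) : Int) := by omega
    have hlt : ((m + 1 : Nat) : Int) < (chars.length : Int) := by exact_mod_cast hn
    have hget : PySem.List.pyGet? chars ((m + 1 : Nat) : Int) = some chars[m + 1] := by
      have := PySem.List.pyGet?_eq_some_getElem chars h0 hlt
      simpa using this
    by_cases hstop : pvIsStop stops chars[m + 1] = true
    · rw [pvLoopA, pvBwd, dif_pos hlt, dif_pos h0, hget]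
      simp only [hstop, if_true]
      rw [slice_self chars _ (by omega)]
      simp
      omega
    · rw [pvLoopA, pvBwd, dif_pos hlt, dif_pos h0, hget]
      simp only [hstop, if_false, Bool.false_eq_true]
      rw [dif_pos trivial, dif_pos (show (0:Int) < ((m+1:Nat):Int) by push_cast; omega)]
      have hcast : ((m + 1 : Nat) : Int) - 1 = ((m : Nat) : Int) := by push_cast; omega
      rw [hcast, ih (chars[m + 1] :: acc) (by omega)]
      have hj1 := pvBwd_le chars stops ((m : Nat) : Int)
      have hj2 := neg_one_le_pvBwd chars stops ((m : Nat) : Int) (by omega)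
      set j := pvBwd chars stops ((m : Nat) : Int) with hjdef
      have hsl0 := slice_snoc chars (j + 1) (((m : Nat) : Int) + 1) (by omega) (by omega)
        (by push_cast; omega)
      simp only [show (((m : Nat) : Int) + 1).toNat = m + 1 from by omega] at hsl0
      have hy : ((m : Nat) : Int) + 1 + 1 = ((m + 1 : Nat) : Int) + 1 := by push_cast; ring
      rw [hy] at hsl0
      rw [hsl0]
      simp

-- ===== VERDICT (by name: the statement is the Claim_ definition above) =====
theorem parse_name_spec : Claim_equal_parse_name := by
  intro st start stops backwards _hdom hpre
  unfold Spec_parse_name parse_name parse_name_alt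
  have hpre' : (0 : Int) ≤ start := hpre
  cases backwards with
  | false =>
    simp only [Bool.false_eq_true, if_false]
    have := fwd_inv st.toList stops (st.toList.length) start [] hpre' (by omega)
    rw [this]
    simp
  | true =>
    simp only [if_true]
    by_cases hge : (st.toList.length : Int) ≤ start
    · rw [if_pos hge, pvLoopA, dif_neg (by omega)]
      rfl
    · rw [if_neg hge]
      have hsn : start = ((start.toNat : Nat) : Int) := by omega
      rw [hsn]
      have := bwd_inv st.toList stops start.toNat [] (by omega)
      rw [this]
      simp
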